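-- pv_equiv track=rewrite | github.com/Veerasaravanans/clean-ai-agent | backend/services/verification_image_service.py | _clean_image_name
-- ===== SOURCE A (Python) =====
-- def _clean_image_name(name: str) -> str:
--     """
--     Clean image name (remove special characters, ensure .png extension).
--
--     Args:
--         name: Original name
--
--     Returns:
--         Cleaned name with .png extension
--     """
--     # Remove special characters, keep alphanumeric and underscores
--     clean = "".join(c if c.isalnum() or c in ('_', '-') else '_' for c in name)
--
--     # Convert to lowercase
--     clean = clean.lower()
--
--     # Remove consecutive underscores
--     while '__' in clean:
--         clean = clean.replace('__', '_')
--
--     # Ensure .png extension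
--     if not clean.endswith('.png'):
--         clean += '.png'
--
--     return clean
-- ===== SOURCE B (Python) =====
-- def _clean_image_name(name: str) -> str:
--     out = []
--     prev_us = False
--     for c in name:
--         d = c if (c.isalnum() or c in ('_', '-')) else '_'
--         d = d.lower()
--         if d == '_':
--             if not prev_us:
--                 out.append('_')
--             prev_us = True
--         else:
--             out.append(d)
--             prev_us = False
--     s = ''.join(out)
--     if not s.endswith('.png'):
--         s += '.png'
--     return s
-- ===== Notes on version B (the rewrite author's own statement) =====
-- stated objective: simpler
-- what changed: Replaces A's separate sanitize-map, whole-string lowercase and repeated replace scans that collapse doubled underscores with a single left-to-right pass that sanitizes, lowercases per character and collapses underscore runs using a prev-underscore flag.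
import Mathlib
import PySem

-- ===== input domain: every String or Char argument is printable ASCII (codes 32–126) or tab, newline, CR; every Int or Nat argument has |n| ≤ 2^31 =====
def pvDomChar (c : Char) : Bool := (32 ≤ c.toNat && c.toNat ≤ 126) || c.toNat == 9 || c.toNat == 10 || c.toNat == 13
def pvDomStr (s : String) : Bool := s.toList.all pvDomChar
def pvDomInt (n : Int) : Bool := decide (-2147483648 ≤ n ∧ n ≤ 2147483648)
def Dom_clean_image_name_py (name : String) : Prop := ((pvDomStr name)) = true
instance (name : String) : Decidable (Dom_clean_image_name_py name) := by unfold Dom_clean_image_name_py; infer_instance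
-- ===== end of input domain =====

-- B fuses A's sanitize-map, whole-string lowercase and repeated '__'->'_' replace scans
-- into one left-to-right pass with a prev-underscore flag (objective: simpler, one pass).


-- ===== PORT A =====
-- pvRep is one non-overlapping left-to-right pass of s.replace('__','_'); it exists only
-- to prove termination of A's while loop (pvLoopA cites pvRep_length_lt in decreasing_by).
def pvRep : List Char → List Char
  | '_' :: '_' :: t => '_' :: pvRep t
  | c :: t => c :: pvRep t
  | [] => []

theorem pvRep_cons (c : Char) (t : List Char) (h : ∀ t', c = '_' → t = '_' :: t' → False) :
    pvRep (c :: t) = c :: pvRep t := by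
  rw [pvRep.eq_def]
  split
  · next t1 heq =>
    injection heq with h1 h2
    exact absurd trivial (fun _ => h t1 h1 h2)
  · next c1 t1 _ heq =>
    injection heq with h1 h2
    subst h1; subst h2; rfl
  · next heq => exact absurd heq (by simp)

theorem pvRep_go_spec (fuel : Nat) (l acc : List Char) (h : l.length ≤ fuel) :
    PySem.Chars.replace.go ['_', '_'] ['_'] fuel l acc = acc.reverse ++ pvRep l := by
  induction fuel generalizing l acc with
  | zero =>
    have hl : l = [] := List.eq_nil_of_length_eq_zero (by omega)
    subst hl
    simp [PySem.Chars.replace.go, pvRep]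
  | succ n ih =>
    match l with
    | [] => simp [PySem.Chars.replace.go, pvRep]
    | c :: t =>
      rw [PySem.Chars.replace.go]
      by_cases hp : List.isPrefixOf ['_', '_'] (c :: t) = true
      · obtain ⟨r, hr⟩ := (List.isPrefixOf_iff_prefix).mp hp
        simp only [List.cons_append, List.nil_append, List.cons.injEq] at hr
        obtain ⟨rfl, rfl, rfl⟩ := hr
        rw [if_pos hp]
        rw [ih _ _ (by simp at h ⊢; omega)]
        simp [pvRep]
      · rw [if_neg hp, ih _ _ (by simp at h ⊢; omega)]
        rw [pvRep_cons c t (by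
          intro t' h1 h2
          subst h1; subst h2
          exact hp ((List.isPrefixOf_iff_prefix).mpr ⟨t', rfl⟩))]
        simp

theorem pvReplace_eq_pvRep (s : List Char) :
    PySem.Chars.replace s ['_', '_'] ['_'] = pvRep s := by
  rw [PySem.Chars.replace]
  simp only [List.isEmpty_cons, Bool.false_eq_true, if_false]
  exact pvRep_go_spec s.length s [] le_rfl

theorem pvRep_length_le (s : List Char) : (pvRep s).length ≤ s.length := by
  induction s using pvRep.induct with
  | case1 t ih => simp only [pvRep, List.length_cons]; omega
  | case2 c t h ih => rw [pvRep_cons c t h]; simp only [List.length_cons]; omega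
  | case3 => simp [pvRep]

theorem pvRep_length_lt (s : List Char) (h : ['_', '_'] <:+: s) :
    (pvRep s).length < s.length := by
  induction s using pvRep.induct with
  | case1 t ih =>
    have := pvRep_length_le t
    simp only [pvRep, List.length_cons]; omega
  | case2 c t hne ih =>
    have ht : ['_', '_'] <:+: t := by
      rcases (List.infix_cons_iff).mp h with hpre | hinf
      · exfalso
        obtain ⟨r, hr⟩ := hpre
        simp only [List.cons_append, List.nil_append, List.cons.injEq] at hr
        exact hne r hr.1.symm hr.2.symm
      · exact hinf
    have := ih ht
    rw [pvRep_cons c t hne]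
    simp only [List.length_cons]; omega
  | case3 => simp at h

-- A's while-loop: while '__' in clean: clean = clean.replace('__','_')
def pvLoopA (s : List Char) : List Char :=
  if h : PySem.Chars.isIn ['_', '_'] s = true then
    pvLoopA (PySem.Chars.replace s ['_', '_'] ['_'])
  else s
termination_by s.length
decreasing_by
  rw [pvReplace_eq_pvRep]
  exact pvRep_length_lt s ((PySem.Chars.isIn_iff_infix _ _).mp h)

def clean_image_name_py (name : String) : String :=
  -- clean = "".join(c if c.isalnum() or c in ('_','-') else '_' for c in name)
  let clean := name.toList.map (fun c =>
    if PySem.Chars.isalnum c || c == '_' || c == '-' then c else '_')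
  -- clean = clean.lower()
  let clean := PySem.Chars.lower clean
  -- while '__' in clean: clean = clean.replace('__','_')
  let clean := pvLoopA clean
  -- if not clean.endswith('.png'): clean += '.png'
  let clean := if PySem.Chars.endswith clean ".png".toList then clean
               else clean ++ ".png".toList
  String.ofList clean

-- ===== PORT B =====
def clean_image_name_py_alt (name : String) : String :=
  let st := name.toList.foldl (fun (st : List Char × Bool) c =>
    let d := if PySem.Chars.isalnum c || c == '_' || c == '-' then c else '_'
    let d := PySem.Chars.lowerChar d
    if d == '_' then
      (if st.2 then st.1 else st.1 ++ ['_'], true)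
    else
      (st.1 ++ [d], false)) ([], false)
  let s := st.1
  let s := if PySem.Chars.endswith s ".png".toList then s else s ++ ".png".toList
  String.ofList s

-- ===== PRECONDITION & SPEC =====
def Spec_clean_image_name_py (name : String) (out : String) : Prop := out = clean_image_name_py_alt name
instance (name : String) (out : String) : Decidable (Spec_clean_image_name_py name out) := by unfold Spec_clean_image_name_py; infer_instance

-- ===== CLAIM (what is proved, stated in full; the proofs are below) =====
def Claim_equal_clean_image_name_py : Prop := ∀ (name : String), Dom_clean_image_name_py name → Spec_clean_image_name_py name (clean_image_name_py name)

-- ===== LEMMAS AND PROOFS =====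

-- One-pass underscore-run collapse with a prev-underscore flag
def pvCol : Bool → List Char → List Char
  | _, [] => []
  | prev, c :: t =>
    if c = '_' then (if prev then pvCol true t else '_' :: pvCol true t)
    else c :: pvCol false t

theorem pvCol_true_eq_false (t : List Char) (h : ∀ c t', t = c :: t' → c ≠ '_') :
    pvCol true t = pvCol false t := by
  cases t with
  | nil => rfl
  | cons c t' => simp [pvCol, h c t' rfl]

theorem pvCol_no_double (s : List Char) (h : ¬ ['_', '_'] <:+: s) : pvCol false s = s := by
  induction s with
  | nil => rfl
  | cons c t ih =>
    have ht : ¬ ['_', '_'] <:+: t := fun hc => h ((List.infix_cons_iff).mpr (Or.inr hc))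
    by_cases hc : c = '_'
    · subst hc
      have hhd : ∀ c2 t', t = c2 :: t' → c2 ≠ '_' := by
        rintro c2 t' rfl rfl
        exact h ⟨[], t', rfl⟩
      simp [pvCol, pvCol_true_eq_false t hhd, ih ht]
    · simp [pvCol, hc, ih ht]

theorem pvCol_pvRep (prev : Bool) (s : List Char) : pvCol prev (pvRep s) = pvCol prev s := by
  induction s using pvRep.induct generalizing prev with
  | case1 t ih =>
    have hr : pvRep ('_' :: '_' :: t) = '_' :: pvRep t := rfl
    rw [hr]
    cases prev <;> simp [pvCol, ih]
  | case2 c t hne ih =>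
    rw [pvRep_cons c t hne]
    by_cases hc : c = '_'
    · subst hc; cases prev <;> simp [pvCol, ih]
    · simp [pvCol, hc, ih]
  | case3 => rfl

theorem pvLoopA_eq_pvCol (s : List Char) : pvLoopA s = pvCol false s := by
  induction s using pvLoopA.induct with
  | case1 s h ih =>
    rw [pvLoopA, dif_pos h, ih, pvReplace_eq_pvRep, pvCol_pvRep]
  | case2 s h =>
    rw [pvLoopA, dif_neg h]
    exact (pvCol_no_double s (fun hinf =>
      h ((PySem.Chars.isIn_iff_infix _ _).mpr hinf))).symm

-- the per-char sanitize+lowercase map both programs apply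
def pvF (c : Char) : Char :=
  PySem.Chars.lowerChar (if PySem.Chars.isalnum c || c == '_' || c == '-' then c else '_')

-- the prev-underscore flag after processing a list
def pvFlag : Bool → List Char → Bool
  | p, [] => p
  | _, c :: t => pvFlag (c == '_') t

def pvStep (st : List Char × Bool) (c : Char) : List Char × Bool :=
  if pvF c = '_' then (if st.2 then st.1 else st.1 ++ ['_'], true)
  else (st.1 ++ [pvF c], false)

theorem pvFoldl_pvStep (l : List Char) (acc : List Char) (prev : Bool) :
    l.foldl pvStep (acc, prev)
    = (acc ++ pvCol prev (l.map pvF), pvFlag prev (l.map pvF)) := by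
  induction l generalizing acc prev with
  | nil => simp [pvCol, pvFlag]
  | cons c t ih =>
    simp only [List.foldl_cons, List.map_cons]
    by_cases hd : pvF c = '_'
    · rw [show pvStep (acc, prev) c = (if prev then acc else acc ++ ['_'], true) from by
        simp [pvStep, hd]]
      cases prev <;> simp [ih, pvCol, pvFlag, hd]
    · rw [show pvStep (acc, prev) c = (acc ++ [pvF c], false) from by simp [pvStep, hd]]
      simp only [pvCol, pvFlag, if_neg hd]
      rw [show (pvF c == '_') = false from by simp [hd]]
      simp [ih]

theorem pvFoldl_eq_pvCol (l : List Char) (acc : List Char) (prev : Bool) :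
    l.foldl (fun (st : List Char × Bool) c =>
      let d := if PySem.Chars.isalnum c || c == '_' || c == '-' then c else '_'
      let d := PySem.Chars.lowerChar d
      if d == '_' then
        (if st.2 then st.1 else st.1 ++ ['_'], true)
      else
        (st.1 ++ [d], false)) (acc, prev)
    = (acc ++ pvCol prev (l.map pvF), pvFlag prev (l.map pvF)) := by
  have hstep : (fun (st : List Char × Bool) c =>
      let d := if PySem.Chars.isalnum c || c == '_' || c == '-' then c else '_'
      let d := PySem.Chars.lowerChar d
      if d == '_' then
        (if st.2 then st.1 else st.1 ++ ['_'], true)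
      else
        (st.1 ++ [d], false)) = pvStep := by
    funext st c
    show (if (pvF c == '_') = true then _ else _) = _
    by_cases h : pvF c = '_'
    · simp [pvStep, h]
    · simp only [pvStep, if_neg h]
      rw [show (pvF c == '_') = false from by simp [h]]
      simp [pvF]
  rw [hstep]
  exact pvFoldl_pvStep l acc prev

theorem clean_image_name_py_eq (name : String) :
    clean_image_name_py name = clean_image_name_py_alt name := by
  unfold clean_image_name_py clean_image_name_py_alt
  rw [pvFoldl_eq_pvCol name.toList [] false]
  have hmap : PySem.Chars.lower (name.toList.map (fun c =>
      if PySem.Chars.isalnum c || c == '_' || c == '-' then c else '_'))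
      = name.toList.map pvF := by
    simp [PySem.Chars.lower, List.map_map, Function.comp, pvF]
  simp only [List.nil_append, hmap, pvLoopA_eq_pvCol]

-- ===== VERDICT (by name: the statement is the Claim_ definition above) =====
theorem clean_image_name_py_spec : Claim_equal_clean_image_name_py := by
  intro name _
  exact clean_image_name_py_eq name
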